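-- pv_equiv track=rewrite | github.com/veritus-git/BadWords | source files/BadWords 2.0.0/src/engine.py | _reconstruct_segments
-- ===== SOURCE A (Python) =====
-- def _reconstruct_segments(words_data):
--     segments = []
--     current_seg = []
--     for w in words_data:
--         if w.get('is_segment_start') and current_seg:
--             segments.append(current_seg)
--             current_seg = []
--         current_seg.append(w)
--     if current_seg: segments.append(current_seg)
--     return segments
-- ===== SOURCE B (Python) =====
-- def _reconstruct_segments(words_data):
--     segments = []
--     n = len(words_data)
--     i = 0
--     while i < n:
--         j = i + 1
--         while j < n and not words_data[j].get('is_segment_start'):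
--             j += 1
--         segments.append(words_data[i:j])
--         i = j
--     return segments
-- ===== Notes on version B (the rewrite author's own statement) =====
-- stated objective: alternative
-- what changed: Replaces the word-by-word accumulator (current_seg grown and flushed on each flag) by an index scan that finds the next segment boundary and emits each segment as one slice words_data[i:j].
import Mathlib
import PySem

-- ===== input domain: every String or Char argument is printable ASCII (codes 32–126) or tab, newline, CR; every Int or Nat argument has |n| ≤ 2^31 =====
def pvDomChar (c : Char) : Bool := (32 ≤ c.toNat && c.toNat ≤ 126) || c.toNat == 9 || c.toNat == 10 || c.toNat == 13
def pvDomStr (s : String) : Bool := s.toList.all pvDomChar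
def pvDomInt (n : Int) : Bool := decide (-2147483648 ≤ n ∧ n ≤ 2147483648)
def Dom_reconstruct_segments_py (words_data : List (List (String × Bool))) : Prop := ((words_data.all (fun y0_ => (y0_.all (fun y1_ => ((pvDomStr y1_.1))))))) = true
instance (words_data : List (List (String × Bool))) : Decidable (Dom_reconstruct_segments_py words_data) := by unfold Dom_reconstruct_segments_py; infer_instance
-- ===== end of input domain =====

-- B replaces A's word-by-word accumulator with an index scan that finds each segment
-- boundary and emits whole segments as slices (objective: alternative, same cost).

-- w.get('is_segment_start') truthiness: first-match lookup, missing key is falsy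
def pvFlag (w : List (String × Bool)) : Bool := (w.lookup "is_segment_start").getD false

-- ===== PORT A =====
-- literal transliteration of A's loop: state = (segments, current_seg)
def reconstruct_segments_py (words_data : List (List (String × Bool))) : List (List (List (String × Bool))) :=
  let st := words_data.foldl
    (fun (st : List (List (List (String × Bool))) × List (List (String × Bool))) w =>
      let st := if pvFlag w && !st.2.isEmpty then (st.1 ++ [st.2], ([] : List (List (String × Bool)))) else st
      (st.1, st.2 ++ [w]))
    ([], [])
  if !st.2.isEmpty then st.1 ++ [st.2] else st.1

-- ===== PORT B =====
-- inner while loop: advance j while j < n and not words_data[j].get('is_segment_start')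
def pvScan (wd : List (List (String × Bool))) (n j : Nat) : Nat :=
  if h : j < n ∧ ¬ (pvFlag (wd.getD j []) = true) then pvScan wd n (j + 1) else j
termination_by n - j
decreasing_by omega

-- needed by pvOuter's termination: the inner scan never moves backwards
theorem pvScan_ge (wd : List (List (String × Bool))) (n j : Nat) : j ≤ pvScan wd n j := by
  unfold pvScan
  split
  · exact le_trans (Nat.le_succ j) (pvScan_ge wd n (j + 1))
  · exact le_refl j
termination_by n - j
decreasing_by omega

-- outer while loop over i, emitting the slice words_data[i:j]
def pvOuter (wd : List (List (String × Bool))) (n i : Nat) : List (List (List (String × Bool))) :=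
  if h : i < n then
    let j := pvScan wd n (i + 1)
    PySem.List.slice wd (some (i : Int)) (some (j : Int)) :: pvOuter wd n j
  else []
termination_by n - i
decreasing_by have := pvScan_ge wd n (i + 1); omega

def reconstruct_segments_py_alt (words_data : List (List (String × Bool))) : List (List (List (String × Bool))) :=
  pvOuter words_data words_data.length 0

-- ===== PRECONDITION & SPEC =====
def Spec_reconstruct_segments_py (words_data : List (List (String × Bool))) (out : List (List (List (String × Bool)))) : Prop := out = reconstruct_segments_py_alt words_data
instance (words_data : List (List (String × Bool))) (out : List (List (List (String × Bool)))) : Decidable (Spec_reconstruct_segments_py words_data out) := by unfold Spec_reconstruct_segments_py; infer_instance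

-- ===== CLAIM (what is proved, stated in full; the proofs are below) =====
def Claim_equal_reconstruct_segments_py : Prop := ∀ (words_data : List (List (String × Bool))), Dom_reconstruct_segments_py words_data → Spec_reconstruct_segments_py words_data (reconstruct_segments_py words_data)

-- ===== LEMMAS AND PROOFS =====

-- canonical form both ports are reduced to
def pvQ (w : List (String × Bool)) : Bool := !pvFlag w

def pvCanon : List (List (String × Bool)) → List (List (List (String × Bool)))
  | [] => []
  | w :: ws => (w :: ws.takeWhile pvQ) :: pvCanon (ws.dropWhile pvQ)
termination_by l => l.length
decreasing_by simpa using Nat.lt_succ_of_le (ws.length_dropWhile_le pvQ)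

theorem pvCanon_cons (w : List (String × Bool)) (ws : List (List (String × Bool))) :
    pvCanon (w :: ws) = (w :: ws.takeWhile pvQ) :: pvCanon (ws.dropWhile pvQ) := by
  rw [pvCanon]

-- A's loop body and finisher, named so the invariant can rewrite with them
def pvStep (st : List (List (List (String × Bool))) × List (List (String × Bool)))
    (w : List (String × Bool)) : List (List (List (String × Bool))) × List (List (String × Bool)) :=
  let st := if pvFlag w && !st.2.isEmpty then (st.1 ++ [st.2], ([] : List (List (String × Bool)))) else st
  (st.1, st.2 ++ [w])

def pvFin (st : List (List (List (String × Bool))) × List (List (String × Bool))) :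
    List (List (List (String × Bool))) :=
  if !st.2.isEmpty then st.1 ++ [st.2] else st.1

theorem pvA_def (wd : List (List (String × Bool))) :
    reconstruct_segments_py wd = pvFin (wd.foldl pvStep ([], [])) := rfl

theorem take_len_takeWhile {α : Type} (q : α → Bool) (l : List α) :
    l.take (l.takeWhile q).length = l.takeWhile q := by
  induction l with
  | nil => rfl
  | cons a l ih =>
    by_cases h : q a = true <;> simp [h, ih]

theorem drop_len_takeWhile {α : Type} (q : α → Bool) (l : List α) :
    l.drop (l.takeWhile q).length = l.dropWhile q := by
  induction l with
  | nil => rfl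
  | cons a l ih =>
    by_cases h : q a = true <;> simp [h, ih]

-- A's loop invariant: with a non-empty current segment, finishing the fold yields the canonical split
theorem pvA_inv (ws : List (List (String × Bool)))
    (segs : List (List (List (String × Bool)))) (cur : List (List (String × Bool))) (hcur : cur ≠ []) :
    pvFin (ws.foldl pvStep (segs, cur))
      = segs ++ ((cur ++ ws.takeWhile pvQ) :: pvCanon (ws.dropWhile pvQ)) := by
  induction ws generalizing segs cur with
  | nil => simp [pvFin, pvCanon, hcur]
  | cons w ws ih =>
    simp only [List.foldl_cons]
    by_cases h : pvFlag w = true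
    · have hinit : pvStep (segs, cur) w = (segs ++ [cur], [w]) := by
        simp [pvStep, h, hcur]
      rw [hinit, ih (segs ++ [cur]) [w] (by simp)]
      have hq : pvQ w = false := by simp [pvQ, h]
      simp [hq, pvCanon_cons]
    · have hinit : pvStep (segs, cur) w = (segs, cur ++ [w]) := by
        simp [pvStep, h]
      rw [hinit, ih segs (cur ++ [w]) (by simp)]
      have hq : pvQ w = true := by simp [pvQ, h]
      simp [hq]

theorem pvA_eq_canon (wd : List (List (String × Bool))) :
    reconstruct_segments_py wd = pvCanon wd := by
  cases wd with
  | nil => rw [pvA_def]; simp [pvFin, pvCanon]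
  | cons w ws =>
    rw [pvA_def]
    simp only [List.foldl_cons]
    have hinit : pvStep (([] : List (List (List (String × Bool)))), ([] : List (List (String × Bool)))) w = ([], [w]) := by
      simp [pvStep]
    rw [hinit, pvA_inv ws [] [w] (by simp), pvCanon_cons]
    simp

-- the inner scan lands at the end of the takeWhile run
theorem pvScan_eq (wd : List (List (String × Bool))) (k : Nat) :
    ∀ j, j + k = wd.length →
      pvScan wd wd.length j = j + ((wd.drop j).takeWhile pvQ).length := by
  induction k with
  | zero =>
    intro j hj
    unfold pvScan
    rw [dif_neg (by omega)]
    rw [List.drop_eq_nil_of_le (by omega : wd.length ≤ j)]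
    simp
  | succ k ih =>
    intro j hj
    have hjlt : j < wd.length := by omega
    have hdrop : wd.drop j = wd[j] :: wd.drop (j + 1) := List.drop_eq_getElem_cons hjlt
    have hgd : wd.getD j [] = wd[j] := by
      simp [List.getD, List.getElem?_eq_getElem hjlt]
    by_cases h : pvFlag wd[j] = true
    · have hq : pvQ wd[j] = false := by simp [pvQ, h]
      unfold pvScan
      rw [dif_neg (by rw [hgd]; simp [h])]
      rw [hdrop, List.takeWhile_cons, hq]
      simp
    · have hq : pvQ wd[j] = true := by simp [pvQ, h]
      unfold pvScan
      rw [dif_pos ⟨hjlt, by rw [hgd]; simp [h]⟩]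
      rw [ih (j + 1) (by omega), hdrop, List.takeWhile_cons, hq]
      simp
      omega

theorem pvOuter_eq_canon (wd : List (List (String × Bool))) (k : Nat) :
    ∀ i, wd.length - i ≤ k →
      pvOuter wd wd.length i = pvCanon (wd.drop i) := by
  induction k with
  | zero =>
    intro i hi
    unfold pvOuter
    rw [dif_neg (by omega)]
    rw [List.drop_eq_nil_of_le (by omega : wd.length ≤ i)]
    rw [pvCanon]
  | succ k ih =>
    intro i hi
    by_cases hlt : i < wd.length
    · have hscan := pvScan_eq wd (wd.length - (i + 1)) (i + 1) (by omega)
      set t := ((wd.drop (i + 1)).takeWhile pvQ).length with ht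
      have htle : t ≤ wd.length - (i + 1) := by
        have h1 := (List.takeWhile_prefix (l := wd.drop (i + 1)) pvQ).length_le
        simp only [List.length_drop] at h1
        omega
      have hdropi : wd.drop i = wd[i] :: wd.drop (i + 1) := List.drop_eq_getElem_cons hlt
      have htail := ih ((i + 1) + t) (by omega)
      have hdd : wd.drop ((i + 1) + t) = (wd.drop (i + 1)).drop t := by
        rw [List.drop_drop]
      have hsub : (i + 1) + t - i = t + 1 := by omega
      unfold pvOuter
      rw [dif_pos hlt]
      simp only [hscan]
      rw [htail, hdd, PySem.List.slice_natCast, hsub, hdropi, List.take_succ_cons, ht,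
          take_len_takeWhile, drop_len_takeWhile]
      rw [pvCanon_cons]
    · unfold pvOuter
      rw [dif_neg hlt]
      rw [List.drop_eq_nil_of_le (by omega : wd.length ≤ i)]
      rw [pvCanon]

-- ===== VERDICT (by name: the statement is the Claim_ definition above) =====
theorem reconstruct_segments_py_spec : Claim_equal_reconstruct_segments_py := by
  intro wd _
  unfold Spec_reconstruct_segments_py reconstruct_segments_py_alt
  rw [pvA_eq_canon, pvOuter_eq_canon wd wd.length 0 (by omega)]
  simp
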